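-- pv_equiv track=rewrite | github.com/mattjhussey/pemjh | src/pemjh/challenge121/main.py | win_chance
-- ===== SOURCE A (Python) =====
-- def win_chance(probs, losses):  # probs are always 1 in...
--     if losses == 0:
--         return 1
--
--     chances = 0
--     # Could it be a win?
--     if len(probs) > losses:
--         # Win, recur
--         chances += win_chance(probs[1:], losses)
--
--     # Loss
--     chances += (probs[0] - 1) * win_chance(probs[1:], losses - 1)
--
--     return chances
-- ===== SOURCE B (Python) =====
-- def win_chance(probs, losses):
--     # DP row: dp[j] = weighted count of sequences with exactly j losses so far
--     dp = [1] + [0] * losses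
--     for p in probs:
--         dp = [1] + [dp[j] + (p - 1) * dp[j - 1] for j in range(1, losses + 1)]
--     return dp[losses]
-- ===== Notes on version B (the rewrite author's own statement) =====
-- stated objective: alternative
-- what changed: Replaced the exponential branching recursion with a single-pass DP row (elementary symmetric sums of p-1), updating dp[j] = dp[j] + (p-1)*dp[j-1] once per element.
-- outside the precondition, e.g. on win_chance([2, 3], 3): A raises IndexError, B returns 0; on win_chance([2], -1): A raises RecursionError, B returns 1
import Mathlib
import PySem

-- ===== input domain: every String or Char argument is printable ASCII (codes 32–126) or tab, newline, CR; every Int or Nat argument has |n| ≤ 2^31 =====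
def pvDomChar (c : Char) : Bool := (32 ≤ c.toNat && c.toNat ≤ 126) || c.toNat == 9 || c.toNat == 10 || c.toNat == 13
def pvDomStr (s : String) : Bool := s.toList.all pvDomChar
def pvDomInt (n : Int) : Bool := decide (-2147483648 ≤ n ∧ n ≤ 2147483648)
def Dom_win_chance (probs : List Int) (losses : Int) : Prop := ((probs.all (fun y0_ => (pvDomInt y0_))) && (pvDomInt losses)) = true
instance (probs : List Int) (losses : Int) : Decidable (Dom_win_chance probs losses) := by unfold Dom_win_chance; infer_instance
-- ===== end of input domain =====

-- B replaces A's branching win/loss recursion by a single left-to-right pass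
-- maintaining one DP row dp[j] (weighted count with exactly j losses); objective: alternative.

-- ===== PORT A =====
def win_chance (probs : List Int) (losses : Int) : Int :=
  if losses = 0 then 1
  else
    match probs with
    | [] => 0  -- Python raises IndexError at probs[0] here; excluded by Pre_
    | p :: rest =>
      (if ((p :: rest).length : Int) > losses then win_chance rest losses else 0)
      + (p - 1) * win_chance rest (losses - 1)

-- ===== PORT B =====
def win_chance_alt (probs : List Int) (losses : Int) : Int :=
  let dp0 : List Int := 1 :: List.replicate losses.toNat 0   -- [1] + [0]*losses
  let dp := probs.foldl (fun dp p =>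
    1 :: (PySem.List.pyRange 1 (losses + 1) 1).map
      (fun j => PySem.List.pyGetD dp j 0 + (p - 1) * PySem.List.pyGetD dp (j - 1) 0)) dp0
  PySem.List.pyGetD dp losses 0   -- dp[losses]; in range under Pre_

-- ===== PRECONDITION & SPEC =====
-- Pre_ excludes exactly the inputs on which A raises: losses > len(probs) (the
-- recursion exhausts probs and probs[0] raises IndexError) and losses < 0 (the
-- win branch recurses forever on [], RecursionError).
def Pre_win_chance (probs : List Int) (losses : Int) : Prop :=
  0 ≤ losses ∧ losses ≤ probs.length
instance (probs : List Int) (losses : Int) : Decidable (Pre_win_chance probs losses) := by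
  unfold Pre_win_chance; infer_instance
def pvWitness_win_chance : List Int × Int := ([2, 3, 4], 2)
def Spec_win_chance (probs : List Int) (losses : Int) (out : Int) : Prop := out = win_chance_alt probs losses
instance (probs : List Int) (losses : Int) (out : Int) : Decidable (Spec_win_chance probs losses out) := by unfold Spec_win_chance; infer_instance

-- ===== CLAIM (what is proved, stated in full; the proofs are below) =====
def Claim_equal_win_chance : Prop := ∀ (probs : List Int) (losses : Int), Dom_win_chance probs losses → Pre_win_chance probs losses → Spec_win_chance probs losses (win_chance probs losses)

-- ===== LEMMAS AND PROOFS =====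

-- elementary symmetric sums of (p - 1), the common mathematical value of both programs
def esym : List Int → Nat → Int
  | _, 0 => 1
  | [], _ + 1 => 0
  | p :: rest, k + 1 => esym rest (k + 1) + (p - 1) * esym rest k

theorem esym_zero (xs : List Int) : esym xs 0 = 1 := by cases xs <;> rfl

theorem esym_of_length_lt : ∀ (xs : List Int) (k : Nat), xs.length < k → esym xs k = 0 := by
  intro xs
  induction xs with
  | nil => intro k hk; cases k with
    | zero => omega
    | succ k => rfl
  | cons p rest ih =>
    intro k hk
    cases k with
    | zero => simp at hk
    | succ k =>
      simp only [List.length_cons] at hk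
      show esym rest (k + 1) + (p - 1) * esym rest k = 0
      rw [ih (k + 1) (by omega), ih k (by omega)]
      ring

theorem winA_eq_esym : ∀ (xs : List Int) (l : Int), 0 ≤ l → l ≤ xs.length →
    win_chance xs l = esym xs l.toNat := by
  intro xs
  induction xs with
  | nil =>
    intro l h0 h1
    simp only [List.length_nil, Int.natCast_zero] at h1
    have : l = 0 := le_antisymm h1 h0
    subst this; rfl
  | cons p rest ih =>
    intro l h0 h1
    by_cases hl : l = 0
    · subst hl; rfl
    · have htn : l.toNat = (l - 1).toNat + 1 := by omega
      rw [win_chance, if_neg hl]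
      by_cases hw : ((p :: rest).length : Int) > l
      · have hle : l ≤ (rest.length : Int) := by
          simp only [List.length_cons] at hw; push_cast at hw ⊢; omega
        rw [if_pos hw, ih l h0 hle,
          ih (l - 1) (by omega) (by omega), htn]
        rfl
      · have hrl : (rest.length : Int) ≤ l - 1 := by
          simp only [List.length_cons] at hw; push_cast at hw; omega
        have hrl2 : l - 1 ≤ (rest.length : Int) := by
          simp only [List.length_cons] at h1; push_cast at h1; omega
        rw [if_neg hw, ih (l - 1) (by omega) hrl2, htn]
        show 0 + (p - 1) * esym rest (l - 1).toNat
            = esym rest ((l - 1).toNat + 1) + (p - 1) * esym rest (l - 1).toNat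
        rw [esym_of_length_lt rest ((l - 1).toNat + 1) (by omega)]

-- the DP row of length K+1 whose entry k is esym ys k
def row (K : Nat) (ys : List Int) : List Int :=
  (List.range (K + 1)).map (fun k => esym ys k)

theorem row_nil (K : Nat) : row K [] = 1 :: List.replicate K 0 := by
  unfold row
  apply List.ext_getElem
  · simp
  · intro i h1 h2
    simp only [List.getElem_map, List.getElem_range]
    cases i with
    | zero => rfl
    | succ i =>
      simp only [List.getElem_cons_succ]
      rw [List.getElem_replicate]
      rfl

theorem row_getD (K : Nat) (ys : List Int) (k : Nat) (hk : k ≤ K) :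
    (row K ys).getD k 0 = esym ys k := by
  unfold row
  rw [List.getD_eq_getElem?_getD, List.getElem?_map,
    List.getElem?_range (by omega : k < K + 1)]
  rfl

theorem esym_append_succ : ∀ (xs : List Int) (p : Int) (k : Nat),
    esym (xs ++ [p]) (k + 1) = esym xs (k + 1) + (p - 1) * esym xs k := by
  intro xs p
  induction xs with
  | nil => intro k; cases k <;> rfl
  | cons q xs ih =>
    intro k
    show esym (xs ++ [p]) (k + 1) + (q - 1) * esym (xs ++ [p]) k
        = (esym xs (k + 1) + (q - 1) * esym xs k) + (p - 1) * esym (q :: xs) k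
    cases k with
    | zero =>
      rw [ih 0, esym_zero, esym_zero, esym_zero]
      ring
    | succ k =>
      rw [ih (k + 1), ih k]
      show esym xs (k + 2) + (p - 1) * esym xs (k + 1)
            + (q - 1) * (esym xs (k + 1) + (p - 1) * esym xs k)
          = esym xs (k + 2) + (q - 1) * esym xs (k + 1)
            + (p - 1) * (esym xs (k + 1) + (q - 1) * esym xs k)
      ring

theorem esym_reverse : ∀ (xs : List Int) (k : Nat), esym xs.reverse k = esym xs k := by
  intro xs
  induction xs with
  | nil => intro k; rfl
  | cons p xs ih =>
    intro k
    cases k with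
    | zero => rw [esym_zero, esym_zero]
    | succ k =>
      rw [List.reverse_cons, esym_append_succ, ih (k + 1), ih k]
      rfl

-- one DP step on a row equals prepending the element
theorem step_row (K : Nat) (ys : List Int) (p : Int) :
    (1 : Int) :: (PySem.List.pyRange 1 ((K : Int) + 1) 1).map
      (fun j => PySem.List.pyGetD (row K ys) j 0
        + (p - 1) * PySem.List.pyGetD (row K ys) (j - 1) 0)
    = row K (p :: ys) := by
  rw [PySem.List.pyRange_one]
  simp only [show ((K : Int) + 1 - 1).toNat = K from by omega]
  rw [List.map_map]
  have hmap : ∀ k ∈ List.range K,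
      ((fun j => PySem.List.pyGetD (row K ys) j 0
        + (p - 1) * PySem.List.pyGetD (row K ys) (j - 1) 0) ∘ (fun k : Nat => (1 : Int) + (k : Int))) k
      = (fun k : Nat => esym ys (k + 1) + (p - 1) * esym ys k) k := by
    intro k hk
    rw [List.mem_range] at hk
    show PySem.List.pyGetD (row K ys) (1 + (k : Int)) 0
        + (p - 1) * PySem.List.pyGetD (row K ys) (1 + (k : Int) - 1) 0
        = esym ys (k + 1) + (p - 1) * esym ys k
    have h2 : (1 : Int) + (k : Int) - 1 = ((k : Nat) : Int) := by omega
    have h1 : (1 : Int) + (k : Int) = ((k + 1 : Nat) : Int) := by push_cast; ring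
    rw [h2, h1, PySem.List.pyGetD_natCast, PySem.List.pyGetD_natCast,
      row_getD K ys (k + 1) (by omega), row_getD K ys k (by omega)]
  rw [List.map_congr_left hmap]
  unfold row
  rw [List.range_succ_eq_map, List.map_cons, List.map_map]
  rfl

theorem foldl_row (K : Nat) : ∀ (xs ys : List Int),
    xs.foldl (fun dp p =>
      (1 : Int) :: (PySem.List.pyRange 1 ((K : Int) + 1) 1).map
        (fun j => PySem.List.pyGetD dp j 0 + (p - 1) * PySem.List.pyGetD dp (j - 1) 0))
      (row K ys)
    = row K (xs.reverse ++ ys) := by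
  intro xs
  induction xs with
  | nil => intro ys; rfl
  | cons p xs ih =>
    intro ys
    rw [List.foldl_cons, step_row K ys p, ih (p :: ys)]
    simp

theorem winB_nat (probs : List Int) (K : Nat) :
    win_chance_alt probs (K : Int) = esym probs K := by
  unfold win_chance_alt
  simp only [Int.toNat_natCast]
  rw [← row_nil K, foldl_row K probs [], List.append_nil,
    PySem.List.pyGetD_natCast, row_getD K probs.reverse K (le_refl K), esym_reverse]

-- ===== VERDICT (by name: the statement is the Claim_ definition above) =====
theorem win_chance_spec : Claim_equal_win_chance := by
  intro probs losses _ hpre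
  obtain ⟨h0, h1⟩ := hpre
  show win_chance probs losses = win_chance_alt probs losses
  rw [winA_eq_esym probs losses h0 h1,
    show losses = ((losses.toNat : Nat) : Int) from by omega, Int.toNat_natCast,
    winB_nat probs losses.toNat]
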